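-- pv_equiv track=rewrite | github.com/tmncollins/AoC-Solutions | 2015/Day20.py | part_2
-- ===== SOURCE A (Python) =====
-- def part_2(pzl_inp):
--     size = int(1e6)
--     houses = [0 for i in range(size)]
--
--     for i in range(1, size):
--         cnt = 0
--         for j in range(i, size, i):
--             houses[j] += 11 * i
--             cnt += 1
--             if cnt == 50: break
--
--     for i in range(size):
--         if houses[i] >= pzl_inp:
--             return i
-- ===== SOURCE B (Python) =====
-- def part_2(pzl_inp):
--     size = int(1e6)
--     for n in range(size):
--         presents = 11 * sum(n // k for k in range(1, 51) if n % k == 0)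
--         if presents >= pzl_inp:
--             return n
-- ===== Notes on version B (the rewrite author's own statement) =====
-- stated objective: simpler
-- what changed: Replaces A's million-entry sieve array (each elf scattering presents onto its first fifty multiples, then a final scan) by a direct per-house present count, eleven times the sum of the cofactors n//k over the capped divisor range, keeping no array at all and stopping at the first qualifying house.
import Mathlib
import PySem

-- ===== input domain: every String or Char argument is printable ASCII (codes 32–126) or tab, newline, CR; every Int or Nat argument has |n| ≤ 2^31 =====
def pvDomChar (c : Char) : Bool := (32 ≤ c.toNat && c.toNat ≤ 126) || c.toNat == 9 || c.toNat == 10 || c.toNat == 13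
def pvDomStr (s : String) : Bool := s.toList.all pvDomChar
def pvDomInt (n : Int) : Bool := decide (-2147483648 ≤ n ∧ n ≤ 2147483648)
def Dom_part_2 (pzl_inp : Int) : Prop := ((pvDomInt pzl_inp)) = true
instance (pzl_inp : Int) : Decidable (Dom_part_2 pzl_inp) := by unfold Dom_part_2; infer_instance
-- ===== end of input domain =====

-- B replaces A's million-entry presents sieve by a direct per-house divisor sum (no array at all); same O(50·size) cost, simpler code.

-- ===== PORT A =====
-- houses[j] += v   (j is always in range in A; Array for the mutated Python list)
def pvBump (h : Array Int) (j : Nat) (v : Int) : Array Int :=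
  h.setIfInBounds j (h.getD j 0 + v)

-- inner loop: for j in range(i, size, i): houses[j] += 11*i; cnt += 1; if cnt == 50: break
def pvInnerA (i : Int) (js : List Int) (cnt : Int) (h : Array Int) : Array Int :=
  match js with
  | [] => h
  | j :: rest =>
      let h := pvBump h j.toNat (11 * i)
      let cnt := cnt + 1
      if cnt == 50 then h else pvInnerA i rest cnt h

-- final loop: for i in range(size): if houses[i] >= pzl_inp: return i
def pvFindA (houses : Array Int) (pzl_inp : Int) : List Int → Option Int
  | [] => none
  | i :: rest =>
      if houses.getD i.toNat 0 ≥ pzl_inp then some i else pvFindA houses pzl_inp rest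

def part_2 (pzl_inp : Int) : Option Int :=
  let size : Int := 1000000
  let houses : Array Int := ((PySem.List.pyRange 0 size 1).map (fun _ => (0 : Int))).toArray
  let houses := (PySem.List.pyRange 1 size 1).foldl
      (fun h i => pvInnerA i (PySem.List.pyRange i size i) 0 h) houses
  pvFindA houses pzl_inp (PySem.List.pyRange 0 size 1)

-- ===== PORT B =====
-- presents = 11 * sum(n // k for k in range(1, 51) if n % k == 0)
def pvPresents (n : Int) : Int :=
  11 * ((PySem.List.pyRange 1 51 1).foldl
      (fun acc k => if PySem.Int.mod n k == 0 then acc + PySem.Int.floordiv n k else acc) 0)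

def pvFindB (pzl_inp : Int) : List Int → Option Int
  | [] => none
  | n :: rest => if pvPresents n ≥ pzl_inp then some n else pvFindB pzl_inp rest

def part_2_alt (pzl_inp : Int) : Option Int :=
  let size : Int := 1000000
  pvFindB pzl_inp (PySem.List.pyRange 0 size 1)

-- ===== PRECONDITION & SPEC =====
def Spec_part_2 (pzl_inp : Int) (out : Option Int) : Prop := out = part_2_alt pzl_inp
instance (pzl_inp : Int) (out : Option Int) : Decidable (Spec_part_2 pzl_inp out) := by unfold Spec_part_2; infer_instance

-- ===== CLAIM (what is proved, stated in full; the proofs are below) =====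
def Claim_equal_part_2 : Prop := ∀ (pzl_inp : Int), Dom_part_2 pzl_inp → Spec_part_2 pzl_inp (part_2 pzl_inp)

-- ===== LEMMAS AND PROOFS =====

-- The closed form of A's sieve value at house n after the outer loop has run i = 1..m.
def pvSA (m n : Nat) : Int :=
  ∑ t ∈ Finset.range m, (if (t+1) ∣ n ∧ (t+1) ≤ n ∧ n / (t+1) ≤ 50 then (11 * (t+1) : Int) else 0)

theorem pvBump_size (h : Array Int) (j : Nat) (v : Int) : (pvBump h j v).size = h.size := by
  simp [pvBump]

theorem pvBump_getD (h : Array Int) (j n : Nat) (v : Int) :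
    (pvBump h j v).getD n 0 = if j = n ∧ n < h.size then h.getD n 0 + v else h.getD n 0 := by
  simp only [pvBump, Array.getD_eq_getD_getElem?, Array.getElem?_setIfInBounds]
  by_cases hj : j = n
  · subst hj
    by_cases hn : j < h.size <;> simp [hn]
  · simp [hj]

theorem foldl_bump_size (js : List Int) (v : Int) (h : Array Int) :
    (js.foldl (fun h j => pvBump h j.toNat v) h).size = h.size := by
  induction js generalizing h with
  | nil => rfl
  | cons j rest ih => simp [List.foldl_cons, ih, pvBump_size]

theorem foldl_bump_getD (js : List Int) (v : Int) (h : Array Int) (n : Nat)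
    (hn : n < h.size) (hjs : ∀ j ∈ js, j.toNat < h.size) :
    (js.foldl (fun h j => pvBump h j.toNat v) h).getD n 0
      = h.getD n 0 + v * (js.countP (fun j => j.toNat == n) : Int) := by
  induction js generalizing h with
  | nil => simp
  | cons j rest ih =>
      rw [List.foldl_cons, ih (pvBump h j.toNat v) (by simpa [pvBump_size] using hn)
          (fun x hx => by simpa [pvBump_size] using hjs x (List.mem_cons_of_mem _ hx))]
      rw [pvBump_getD, List.countP_cons]
      by_cases hj : j.toNat = n
      · simp [hj, hn]
        ring
      · simp [hj]

theorem pvInnerA_eq_foldl_take (i : Int) (js : List Int) (c : Nat) (h : Array Int) (hc : c < 50) :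
    pvInnerA i js (c : Int) h
      = (js.take (50 - c)).foldl (fun h j => pvBump h j.toNat (11 * i)) h := by
  induction js generalizing c h with
  | nil => simp [pvInnerA]
  | cons j rest ih =>
      have h50 : 50 - c = (50 - (c+1)) + 1 := by omega
      simp only [pvInnerA]
      by_cases hc49 : c = 49
      · subst hc49
        norm_num
      · have hlt : c + 1 < 50 := by omega
        have hne : ((c : Int) + 1 == 50) = false := by
          simp; omega
        rw [hne]
        simp only [Bool.false_eq_true, if_false]
        have hih := ih (c+1) (pvBump h j.toNat (11*i)) hlt
        push_cast at hih
        rw [hih, h50]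
        simp [List.take_succ_cons]

theorem countP_capped_range (i N n : Nat) (hi : 1 ≤ i) (hiN : i < N) (hn : n < N) :
    ((PySem.List.pyRange (i : Int) (N : Int) (i : Int)).take 50).countP (fun j => j.toNat == n)
      = if i ∣ n ∧ i ≤ n ∧ n / i ≤ 50 then 1 else 0 := by
  have hipos : (0:Int) < (i:Int) := by exact_mod_cast hi
  rw [PySem.List.pyRange_of_pos _ _ hipos]
  have hlt : ((i:Int) < (N:Int)) := by exact_mod_cast hiN
  rw [if_pos hlt]
  have hcast : ((N:Int) - i + i - 1) = (((N - 1 : Nat)) : Int) := by omega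
  rw [hcast, ← Int.natCast_div, Int.toNat_natCast]
  rw [← List.map_take, List.take_range]
  rw [List.countP_map]
  set M := min 50 ((N-1)/i) with hM
  have hpred : ∀ k ∈ List.range M,
      (((fun j : Int => j.toNat == n) ∘ (fun k : Nat => (i:Int) + i * k)) k = true ↔ (i * (k+1) == n) = true) := by
    intro k _
    simp only [Function.comp]
    have htn : ((i:Int) + i * k).toNat = i * (k+1) := by
      have heq : ((i:Int) + i * k) = ((i * (k+1) : Nat) : Int) := by push_cast; ring
      rw [heq, Int.toNat_natCast]
    rw [htn]
  rw [List.countP_congr hpred]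
  by_cases hdvd : i ∣ n ∧ i ≤ n
  · obtain ⟨hd, hle⟩ := hdvd
    obtain ⟨c, hc⟩ := hd
    have hd' : i ∣ n := ⟨c, hc⟩
    have hc1 : 1 ≤ c := by
      by_contra hcon
      have hc0 : c = 0 := by omega
      rw [hc0, Nat.mul_zero] at hc
      omega
    have hni : n / i = c := by rw [hc, Nat.mul_div_cancel_left _ (by omega)]
    have hdivle : (N-1)/i ≥ c := by
      rw [← hni]
      exact Nat.div_le_div_right (by omega)
    have hpred2 : ∀ k ∈ List.range M, ((i * (k+1) == n) = true ↔ (k == c - 1) = true) := by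
      intro k _
      rw [hc]
      simp only [beq_iff_eq, Nat.mul_left_cancel_iff (by omega : 0 < i)]
      by_cases h : k + 1 = c
      · simp [h]; omega
      · have hne : ¬ (k = c - 1) := by omega
        simp [h, hne]
    rw [List.countP_congr hpred2]
    have hcc : List.countP (fun k => k == c - 1) (List.range M) = List.count (c-1) (List.range M) := by
      rfl
    rw [hcc, List.count_range, hni]
    by_cases hc50 : c ≤ 50
    · have hcM : c ≤ M := le_min hc50 hdivle
      have hlt1 : c - 1 < M := by omega
      simp [hlt1, hle, hc50, hd']
    · have hMle : M ≤ 50 := Nat.min_le_left _ _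
      have hlt1 : ¬ (c - 1 < M) := by omega
      simp [hlt1, hc50]
  · have hf : ∀ k ∈ List.range M, ¬ (i * (k+1) == n) = true := by
      intro k _
      simp only [beq_iff_eq]
      intro h
      apply hdvd
      refine ⟨⟨k+1, h.symm⟩, ?_⟩
      calc i = i * 1 := (Nat.mul_one i).symm
        _ ≤ i * (k+1) := Nat.mul_le_mul_left i (by omega)
        _ = n := h
    rw [List.countP_eq_zero.mpr hf]
    have hnc : ¬ (i ∣ n ∧ i ≤ n ∧ n / i ≤ 50) := by tauto
    simp [hnc]

theorem pvInnerA_step (i N : Nat) (hi : 1 ≤ i) (hiN : i < N) (h : Array Int) (hsz : h.size = N) :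
    (pvInnerA (i : Int) (PySem.List.pyRange (i : Int) (N : Int) (i : Int)) 0 h).size = N ∧
    ∀ n < N, (pvInnerA (i : Int) (PySem.List.pyRange (i : Int) (N : Int) (i : Int)) 0 h).getD n 0
      = h.getD n 0 + (if i ∣ n ∧ i ≤ n ∧ n / i ≤ 50 then (11 * i : Int) else 0) := by
  have h0 : ((0:Nat) : Int) = (0 : Int) := rfl
  have heq := pvInnerA_eq_foldl_take (i : Int) (PySem.List.pyRange (i : Int) (N : Int) (i : Int)) 0 h (by norm_num)
  rw [h0] at heq
  have hjsall : ∀ j ∈ (PySem.List.pyRange (i : Int) (N : Int) (i : Int)).take 50, j.toNat < h.size := by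
    intro j hj
    have hm := List.mem_of_mem_take hj
    have hipos : (0:Int) < (i:Int) := by exact_mod_cast hi
    rw [PySem.List.mem_pyRange_iff_of_pos hipos] at hm
    rw [hsz]
    omega
  constructor
  · rw [heq, foldl_bump_size, hsz]
  · intro n hn
    rw [heq, Nat.sub_zero, foldl_bump_getD _ _ _ _ (by omega) hjsall]
    rw [countP_capped_range i N n hi hiN hn]
    by_cases hcond : i ∣ n ∧ i ≤ n ∧ n / i ≤ 50
    · simp [hcond]
    · simp [hcond]

theorem outer_fold (N : Nat) (hN : 1 ≤ N) (m : Nat) (hm : m ≤ N - 1) (h : Array Int) (hsz : h.size = N) :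
    ((PySem.List.pyRange 1 (1 + (m : Int)) 1).foldl
        (fun h i => pvInnerA i (PySem.List.pyRange i (N : Int) i) 0 h) h).size = N ∧
    ∀ n < N, ((PySem.List.pyRange 1 (1 + (m : Int)) 1).foldl
        (fun h i => pvInnerA i (PySem.List.pyRange i (N : Int) i) 0 h) h).getD n 0
      = h.getD n 0 + pvSA m n := by
  induction m with
  | zero =>
      rw [PySem.List.pyRange_one_eq_nil (by norm_num)]
      simp [pvSA, hsz]
  | succ m ih =>
      have hm' : m ≤ N - 1 := by omega
      have hsplit : PySem.List.pyRange 1 (1 + ((m+1 : Nat) : Int)) 1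
          = PySem.List.pyRange 1 (1 + (m : Int)) 1 ++ [1 + (m : Int)] := by
        have h1 : (1 + ((m+1 : Nat) : Int)) = (1 + (m : Int)) + 1 := by push_cast; ring
        rw [h1, PySem.List.pyRange_one_succ_right (by omega)]
      rw [hsplit, List.foldl_append]
      obtain ⟨ihsz, ihval⟩ := ih hm'
      simp only [List.foldl_cons, List.foldl_nil]
      have hcast : (1 + (m : Int)) = ((m + 1 : Nat) : Int) := by push_cast; ring
      rw [hcast] at ihsz ihval ⊢
      have hstep := pvInnerA_step (m+1) N (by omega) (by omega)
          ((PySem.List.pyRange 1 ((m + 1 : Nat) : Int) 1).foldl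
            (fun h i => pvInnerA i (PySem.List.pyRange i (N : Int) i) 0 h) h) ihsz
      refine ⟨hstep.1, ?_⟩
      intro n hn
      rw [hstep.2 n hn, ihval n hn]
      simp only [pvSA, Finset.sum_range_succ]
      push_cast
      ring

theorem sum_map_range {M : Type} [AddCommMonoid M] (f : Nat → M) (m : Nat) :
    ((List.range m).map f).sum = ∑ k ∈ Finset.range m, f k := by
  induction m with
  | zero => simp
  | succ m ih => rw [List.range_succ, Finset.sum_range_succ, List.map_append, List.sum_append, ih]; simp

theorem foldl_if_acc (L : List Int) (p : Int → Bool) (f : Int → Int) (a : Int) :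
    L.foldl (fun acc k => if p k then acc + f k else acc) a
      = a + (L.map (fun k => if p k then f k else 0)).sum := by
  induction L generalizing a with
  | nil => simp
  | cons x xs ih =>
      simp only [List.foldl_cons, List.map_cons, List.sum_cons, ih]
      by_cases hp : p x
      · simp [hp]; ring
      · simp [hp]

theorem pvPresents_closed (n : Nat) :
    pvPresents (n : Int) = 11 * ∑ k ∈ Finset.range 50, (if (k+1) ∣ n then ((n / (k+1) : Nat) : Int) else 0) := by
  unfold pvPresents
  rw [foldl_if_acc, PySem.List.pyRange_one]
  have h50 : ((51:Int) - 1).toNat = 50 := by decide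
  rw [h50, List.map_map, sum_map_range, zero_add]
  congr 1
  apply Finset.sum_congr rfl
  intro k _
  simp only [Function.comp]
  have hcast : (1 : Int) + (k : Int) = ((k + 1 : Nat) : Int) := by push_cast; ring
  rw [hcast, PySem.Int.mod_natCast, PySem.Int.floordiv_natCast]
  by_cases hd : (k+1) ∣ n
  · have hm : n % (k+1) = 0 := Nat.mod_eq_zero_of_dvd hd
    simp [hd, hm]
  · have hm : ¬ (n % (k+1) = 0) := by
      rw [← Nat.dvd_iff_mod_eq_zero]
      exact hd
    simp [hd, hm]
    intro hcon
    exact absurd (by exact_mod_cast hcon) hd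

theorem reindexNat (N n : Nat) (hn1 : 1 ≤ n) (hn : n < N) :
    ∑ t ∈ Finset.range (N-1), (if (t+1) ∣ n ∧ (t+1) ≤ n ∧ n/(t+1) ≤ 50 then (t+1) else 0)
      = ∑ k ∈ Finset.range 50, (if (k+1) ∣ n then n/(k+1) else 0) := by
  rw [← Finset.sum_filter, ← Finset.sum_filter]
  refine Finset.sum_nbij' (i := fun t => n/(t+1) - 1) (j := fun k => n/(k+1) - 1) ?_ ?_ ?_ ?_ ?_
  · intro t ht
    simp only [Finset.mem_filter, Finset.mem_range] at ht ⊢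
    obtain ⟨htN, hd, hle, hq⟩ := ht
    have hc1 : 1 ≤ n/(t+1) := (Nat.one_le_div_iff (by omega)).mpr hle
    refine ⟨by omega, ?_⟩
    have : n/(t+1) - 1 + 1 = n/(t+1) := by omega
    rw [this]
    exact Nat.div_dvd_of_dvd hd
  · intro k hk
    simp only [Finset.mem_filter, Finset.mem_range] at hk ⊢
    obtain ⟨hk50, hd⟩ := hk
    have hkn : k + 1 ≤ n := Nat.le_of_dvd (by omega) hd
    have hd1 : 1 ≤ n/(k+1) := (Nat.one_le_div_iff (by omega)).mpr hkn
    have hdn : n/(k+1) ≤ n := Nat.div_le_self _ _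
    have heq : n/(k+1) - 1 + 1 = n/(k+1) := by omega
    refine ⟨by omega, ?_, ?_, ?_⟩
    · rw [heq]; exact Nat.div_dvd_of_dvd hd
    · omega
    · rw [heq, Nat.div_div_self hd (by omega)]
      omega
  · intro t ht
    simp only [Finset.mem_filter, Finset.mem_range] at ht
    obtain ⟨htN, hd, hle, hq⟩ := ht
    have hc1 : 1 ≤ n/(t+1) := (Nat.one_le_div_iff (by omega)).mpr hle
    have heq : n/(t+1) - 1 + 1 = n/(t+1) := by omega
    simp only [heq, Nat.div_div_self hd (by omega)]
    omega
  · intro k hk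
    simp only [Finset.mem_filter, Finset.mem_range] at hk
    obtain ⟨hk50, hd⟩ := hk
    have hkn : k + 1 ≤ n := Nat.le_of_dvd (by omega) hd
    have hd1 : 1 ≤ n/(k+1) := (Nat.one_le_div_iff (by omega)).mpr hkn
    have heq : n/(k+1) - 1 + 1 = n/(k+1) := by omega
    simp only [heq, Nat.div_div_self hd (by omega)]
    omega
  · intro t ht
    simp only [Finset.mem_filter, Finset.mem_range] at ht
    obtain ⟨htN, hd, hle, hq⟩ := ht
    have hc1 : 1 ≤ n/(t+1) := (Nat.one_le_div_iff (by omega)).mpr hle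
    have heq : n/(t+1) - 1 + 1 = n/(t+1) := by omega
    rw [heq, Nat.div_div_self hd (by omega)]

theorem reindex (N n : Nat) (hn1 : 1 ≤ n) (hn : n < N) :
    pvSA (N - 1) n = 11 * ∑ k ∈ Finset.range 50, (if (k+1) ∣ n then ((n / (k+1) : Nat) : Int) else 0) := by
  have hL : pvSA (N - 1) n
      = ((11 * ∑ t ∈ Finset.range (N-1), (if (t+1) ∣ n ∧ (t+1) ≤ n ∧ n/(t+1) ≤ 50 then (t+1) else 0) : Nat) : Int) := by
    unfold pvSA
    push_cast [Finset.mul_sum]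
    apply Finset.sum_congr rfl
    intro t _
    split <;> push_cast <;> ring
  have hR : (11 : Int) * ∑ k ∈ Finset.range 50, (if (k+1) ∣ n then ((n / (k+1) : Nat) : Int) else 0)
      = ((11 * ∑ k ∈ Finset.range 50, (if (k+1) ∣ n then n/(k+1) else 0) : Nat) : Int) := by
    push_cast [Finset.mul_sum]
    apply Finset.sum_congr rfl
    intro k _
    split <;> push_cast <;> ring
  rw [hL, hR, reindexNat N n hn1 hn]

theorem pvSA_eq_presents (N n : Nat) (hn : n < N) :
    pvSA (N - 1) n = pvPresents (n : Int) := by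
  rcases Nat.eq_zero_or_pos n with h0 | h1
  · subst h0
    rw [pvPresents_closed]
    unfold pvSA
    have hz : ∀ k : Nat, ((0 / (k+1) : Nat) : Int) = 0 := by intro k; simp
    simp
  · rw [pvPresents_closed, reindex N n h1 hn]

theorem find_congr (houses : Array Int) (p : Int) (L : List Int)
    (hL : ∀ i ∈ L, houses.getD i.toNat 0 = pvPresents i) :
    pvFindA houses p L = pvFindB p L := by
  induction L with
  | nil => rfl
  | cons i rest ih =>
      have hi := hL i (by simp)
      simp only [pvFindA, pvFindB, hi]
      split
      · rfl
      · exact ih (fun j hj => hL j (by simp [hj]))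

-- ===== VERDICT (by name: the statement is the Claim_ definition above) =====
theorem part_2_spec : Claim_equal_part_2 := by
  intro pzl _
  unfold Spec_part_2 part_2 part_2_alt
  dsimp only
  apply find_congr
  intro i hi
  rw [PySem.List.mem_pyRange_one] at hi
  obtain ⟨h0, h1M⟩ := hi
  have hsz : (((PySem.List.pyRange 0 (1000000:Int) 1).map (fun _ => (0 : Int))).toArray).size = 1000000 := by
    rw [List.size_toArray, List.length_map, PySem.List.length_pyRange_one]
    rfl
  have hzero : ∀ n : Nat, (((PySem.List.pyRange 0 (1000000:Int) 1).map (fun _ => (0 : Int))).toArray).getD n 0 = 0 := by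
    intro n
    rw [Array.getD_eq_getD_getElem?, List.getElem?_toArray, List.getElem?_map]
    rcases h : (PySem.List.pyRange 0 (1000000:Int) 1)[n]? <;> simp
  have hof := outer_fold 1000000 (by norm_num) 999999 (by norm_num)
      (((PySem.List.pyRange 0 (1000000:Int) 1).map (fun _ => (0 : Int))).toArray) hsz
  have hrange : (1 + ((999999:Nat):Int)) = (1000000:Int) := by norm_num
  have hcastN : (((1000000:Nat)):Int) = (1000000:Int) := by norm_num
  simp only [hrange, hcastN] at hof
  have hnlt : i.toNat < 1000000 := by omega
  have hval := hof.2 i.toNat hnlt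
  rw [hzero i.toNat, zero_add] at hval
  rw [hval]
  have h99 : (1000000 : Nat) - 1 = 999999 := by norm_num
  have := pvSA_eq_presents 1000000 i.toNat hnlt
  rw [h99] at this
  rw [this, Int.toNat_of_nonneg h0]
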